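-- pv_equiv track=rewrite | github.com/wibaek/PS | BOJ/8000/8958.py | func
-- ===== SOURCE A (Python) =====
-- def func(text):
--     score = 0
--     nowscore = 0
--     for x in text:
--         if x == 'O':
--             nowscore += 1
--             score += nowscore
--
--         elif x == 'X':
--             nowscore = 0
--     return score
-- ===== SOURCE B (Python) =====
-- def func(text):
--     # Split on 'X'; each X-free segment with c 'O's contributes the triangular number c*(c+1)//2.
--     return sum(seg.count('O') * (seg.count('O') + 1) // 2 for seg in text.split('X'))
-- ===== Notes on version B (the rewrite author's own statement) =====
-- stated objective: faster
-- what changed: Replaces the running-streak accumulator (add nowscore per character) by splitting the string on 'X' and adding the closed-form triangular number c*(c+1)//2 per segment's 'O'-count, moving the per-character work into C-level str.split/str.count.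
import Mathlib
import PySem

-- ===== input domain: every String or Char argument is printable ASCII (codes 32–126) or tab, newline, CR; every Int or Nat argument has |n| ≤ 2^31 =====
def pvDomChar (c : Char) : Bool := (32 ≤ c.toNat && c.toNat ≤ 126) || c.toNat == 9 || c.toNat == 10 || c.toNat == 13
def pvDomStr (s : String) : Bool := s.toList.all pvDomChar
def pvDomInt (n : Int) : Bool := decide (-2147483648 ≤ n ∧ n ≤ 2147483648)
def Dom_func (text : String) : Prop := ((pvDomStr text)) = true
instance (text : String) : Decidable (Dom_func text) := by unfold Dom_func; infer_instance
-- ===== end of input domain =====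

-- B replaces A's running-streak accumulator by split-on-'X' plus the closed-form triangular number per segment (alternative decomposition, same O(n) cost).

-- ===== PORT A =====
-- for x in text: if x=='O': nowscore+=1; score+=nowscore elif x=='X': nowscore=0
def func (text : String) : Int :=
  (text.toList.foldl
    (fun (st : Int × Int) x =>
      if x = 'O' then (st.1 + (st.2 + 1), st.2 + 1)
      else if x = 'X' then (st.1, 0)
      else st)
    (0, 0)).1

-- ===== PORT B =====
-- sum(seg.count('O') * (seg.count('O') + 1) // 2 for seg in text.split('X'))
def func_alt (text : String) : Int :=
  ((PySem.Chars.splitOn text.toList ['X']).map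
    (fun seg =>
      PySem.Int.floordiv
        ((PySem.Chars.count seg ['O'] : Int) * ((PySem.Chars.count seg ['O'] : Int) + 1)) 2)).sum

-- ===== PRECONDITION & SPEC =====
def Spec_func (text : String) (out : Int) : Prop := out = func_alt text
instance (text : String) (out : Int) : Decidable (Spec_func text out) := by unfold Spec_func; infer_instance

-- ===== CLAIM (what is proved, stated in full; the proofs are below) =====
def Claim_equal_func : Prop := ∀ (text : String), Dom_func text → Spec_func text (func text)

-- ===== LEMMAS AND PROOFS =====

-- triangular number over Nat, as an Int
def triI (n : Nat) : Int := ((n * (n + 1) / 2 : Nat) : Int)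

-- remaining contribution of cs when the current run already holds n 'O's
def G : List Char → Nat → Int
  | [], n => triI n
  | c :: cs, n => if c = 'X' then triI n + G cs 0 else G cs (n + if c = 'O' then 1 else 0)

lemma tri_succ (n : Nat) : (n + 1) * (n + 2) / 2 = n * (n + 1) / 2 + (n + 1) := by
  obtain ⟨k, hk⟩ := Nat.even_mul_succ_self n
  have h2 : (n + 1) * (n + 2) = n * (n + 1) + 2 * (n + 1) := by ring
  omega

lemma triI_succ (n : Nat) : triI (n + 1) = triI n + (n + 1 : Nat) := by
  simp [triI, tri_succ n]

-- count.go for the single-character needle 'O' is List.count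
lemma countO_go (fuel : Nat) : ∀ (l : List Char) (acc : Nat), l.length ≤ fuel →
    PySem.Chars.count.go ['O'] fuel l acc = acc + l.count 'O' := by
  induction fuel with
  | zero => intro l acc h; simp at h; subst h; simp [PySem.Chars.count.go]
  | succ fuel ih =>
    intro l acc h
    cases l with
    | nil => simp [PySem.Chars.count.go]
    | cons c rest =>
      simp only [PySem.Chars.count.go, List.isPrefixOf, List.length_cons] at *
      by_cases hc : c = 'O'
      · subst hc
        simp only [BEq.rfl, Bool.true_and, if_true]
        have hd : List.drop (List.length ([] : List Char) + 1) ('O' :: rest) = rest := rfl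
        rw [hd, ih rest (acc + 1) (by omega)]
        simp
        omega
      · have hb : ('O' == c) = false := by rw [beq_eq_false_iff_ne]; exact Ne.symm hc
        simp only [hb, Bool.false_and, Bool.false_eq_true, if_false]
        rw [ih rest acc (by omega)]
        have hb2 : (c == 'O') = false := by rw [beq_eq_false_iff_ne]; exact hc
        simp [List.count_cons, hb2]

lemma countO (l : List Char) : PySem.Chars.count l ['O'] = l.count 'O' := by
  simp [PySem.Chars.count, countO_go l.length l 0 le_rfl]

-- the per-segment summand of B equals triI of the 'O'-count
lemma f_eq (seg : List Char) :
    PySem.Int.floordiv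
      ((PySem.Chars.count seg ['O'] : Int) * ((PySem.Chars.count seg ['O'] : Int) + 1)) 2
      = triI (seg.count 'O') := by
  rw [countO]
  have h : ((seg.count 'O' : Nat) : Int) * (((seg.count 'O' : Nat) : Int) + 1)
      = (((seg.count 'O') * (seg.count 'O' + 1) : Nat) : Int) := by push_cast; ring
  rw [h]
  exact_mod_cast PySem.Int.floordiv_natCast (seg.count 'O' * (seg.count 'O' + 1)) 2

-- abbreviation for B's sum over a list of segments
def S (ls : List (List Char)) : Int :=
  (ls.map (fun seg =>
    PySem.Int.floordiv
      ((PySem.Chars.count seg ['O'] : Int) * ((PySem.Chars.count seg ['O'] : Int) + 1)) 2)).sum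

lemma S_reverse (ls : List (List Char)) : S ls.reverse = S ls := by
  simp [S, List.map_reverse, List.sum_reverse]

lemma S_cons (l : List Char) (ls : List (List Char)) : S (l :: ls) = triI (l.count 'O') + S ls := by
  simp only [S, List.map_cons, List.sum_cons, f_eq]

lemma S_append (xs ys : List (List Char)) : S (xs ++ ys) = S xs + S ys := by
  simp [S]

lemma S_singleton (l : List Char) : S [l] = triI (l.count 'O') := by
  rw [S_cons]
  simp only [S, List.map_nil, List.sum_nil, add_zero]

-- splitOn.go, summed through B's summand, is the closed segment sum plus G on the rest
lemma go_sum (fuel : Nat) : ∀ (cs cur : List Char) (acc : List (List Char)), cs.length ≤ fuel →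
    S (PySem.Chars.splitOn.go ['X'] fuel cs cur acc) = S acc + G cs (cur.count 'O') := by
  induction fuel with
  | zero =>
    intro cs cur acc h
    simp at h; subst h
    simp only [PySem.Chars.splitOn.go, List.append_nil, List.reverse_cons]
    rw [S_append, S_reverse, S_singleton, List.count_reverse]
    simp [G]
  | succ fuel ih =>
    intro cs cur acc h
    cases cs with
    | nil =>
      simp only [PySem.Chars.splitOn.go, List.reverse_cons]
      rw [S_append, S_reverse, S_singleton, List.count_reverse]
      simp [G]
    | cons c rest =>
      by_cases hc : c = 'X'
      · subst hc
        have hpre : (['X'].isPrefixOf ('X' :: rest)) = true := by simp [List.isPrefixOf]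
        simp only [PySem.Chars.splitOn.go, hpre, if_true]
        have hd : List.drop ['X'].length ('X' :: rest) = rest := rfl
        rw [hd, ih rest [] (cur.reverse :: acc) (by simp at h; omega)]
        rw [S_cons, List.count_reverse]
        simp only [G, if_true, List.count_nil]
        ring
      · have hpre : (['X'].isPrefixOf (c :: rest)) = false := by
          simp only [List.isPrefixOf, Bool.and_true]
          rw [beq_eq_false_iff_ne]; exact Ne.symm hc
        simp only [PySem.Chars.splitOn.go, hpre, Bool.false_eq_true, if_false]
        rw [ih rest (c :: cur) acc (by simp at h; omega)]
        by_cases ho : c = 'O'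
        · subst ho; simp [G]
        · have hb : (c == 'O') = false := by rw [beq_eq_false_iff_ne]; exact ho
          simp [G, hc, ho]

-- A's fold, started with run length n, computed from G
lemma foldA (cs : List Char) : ∀ (s : Int) (n : Nat),
    (cs.foldl
      (fun (st : Int × Int) x =>
        if x = 'O' then (st.1 + (st.2 + 1), st.2 + 1)
        else if x = 'X' then (st.1, 0)
        else st)
      (s, (n : Int))).1 = s + G cs n - triI n := by
  induction cs with
  | nil => intro s n; simp [G]
  | cons c rest ih =>
    intro s n
    by_cases ho : c = 'O'
    · subst ho
      have hn : ((n : Int) + 1) = ((n + 1 : Nat) : Int) := by push_cast; ring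
      simp only [List.foldl_cons, reduceIte, hn]
      rw [ih (s + ((n + 1 : Nat) : Int)) (n + 1)]
      rw [triI_succ]
      simp only [G, if_true]
      push_cast
      ring
    · by_cases hx : c = 'X'
      · subst hx
        simp only [List.foldl_cons, if_neg ho, if_true]
        have h' := ih s 0
        norm_num at h'
        rw [h']
        simp [G, triI]
        ring
      · simp only [List.foldl_cons, ho, hx, if_false]
        rw [ih s n]
        simp [G, ho, hx]

-- ===== VERDICT (by name: the statement is the Claim_ definition above) =====
theorem func_spec : Claim_equal_func := by
  intro text _
  show func text = func_alt text
  have hb : func_alt text = S (PySem.Chars.splitOn text.toList ['X']) := rfl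
  rw [hb]
  unfold PySem.Chars.splitOn
  rw [go_sum (text.toList.length + 1) text.toList [] [] (by omega)]
  unfold func
  have hf := foldA text.toList 0 0
  norm_num at hf
  rw [hf]
  simp [S, triI]
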